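-- pv_equiv track=rewrite | github.com/volkir31/university | lab5/5_task.py | comment_in_line
-- ===== SOURCE A (Python) =====
-- def comment_in_line(line: str):
--     code_line = []
--     for symb in range(len(line)):
--         if line[symb] == '\'' or line[symb] == '"':
--             code_line.append(symb)
--
--     if not code_line and '#' in line:
--         return True, line.find('#')
--
--     for i in range(len(line)):
--         if line[i] == '#':
--             for j in range(len(code_line) - 1):
--                 if code_line[j] < i < code_line[j + 1]:
--                     if j % 2 == 1:
--                         return True, i
--                 elif i < code_line[0] or i > code_line[len(code_line) - 1]:
--                     return True, i
--
--     return False, -1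
-- ===== SOURCE B (Python) =====
-- def comment_in_line(line: str):
--     # single forward scan keeping a running quote count; a hash starts a comment
--     # when an even number of quotes precede it or it lies after the last quote
--     last_quote = -1
--     for i, c in enumerate(line):
--         if c == '\'' or c == '"':
--             last_quote = i
--     quotes_before = 0
--     for i, c in enumerate(line):
--         if c == '\'' or c == '"':
--             quotes_before += 1
--         elif c == '#' and (quotes_before % 2 == 0 or i > last_quote):
--             return True, i
--     return False, -1
-- ===== Notes on version B (the rewrite author's own statement) =====
-- stated objective: simpler
-- what changed: replaces A's quote-index list plus per-hash nested interval scan by a single forward scan keeping a running quote-count parity (and the precomputed last-quote index), so the inner loop over quote positions disappears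
-- intended difference: on lines containing exactly one quote character and at least one hash mark, A's inner loop over quote pairs is empty so A returns (False, -1), while B returns (True, index of the first hash), which is intended since that hash lies outside any string literal — e.g. on comment_in_line("x = 1 # can't"): A returns (false, -1), B returns (true, 7)
import Mathlib
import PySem

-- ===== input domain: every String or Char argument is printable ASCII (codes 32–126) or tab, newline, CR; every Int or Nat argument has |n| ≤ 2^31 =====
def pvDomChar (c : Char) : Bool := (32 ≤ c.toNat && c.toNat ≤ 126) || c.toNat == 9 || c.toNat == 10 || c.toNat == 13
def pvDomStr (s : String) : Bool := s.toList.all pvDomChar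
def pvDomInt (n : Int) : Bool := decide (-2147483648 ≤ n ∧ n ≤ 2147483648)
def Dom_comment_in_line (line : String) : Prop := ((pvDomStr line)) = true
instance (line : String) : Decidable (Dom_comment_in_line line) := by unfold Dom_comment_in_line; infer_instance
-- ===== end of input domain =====

-- B replaces A's quote-index list and per-hash nested interval scan by one forward scan with a
-- running quote-count parity (plus the precomputed last-quote index); on lines with exactly one
-- quote and a hash mark, A returns (False, -1) while B flags the comment (stated as D_ below).

-- ===== PORT A =====
-- inner 'for j in range(len(code_line) - 1)' loop of A: it can only early-return True
def pvInnerA (code_line : List Nat) (i : Nat) : Bool :=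
  (List.range (code_line.length - 1)).any (fun j =>
    if code_line[j]! < i && i < code_line[j+1]! then decide (j % 2 = 1)
    else decide (i < code_line[0]!) || decide (code_line[code_line.length - 1]! < i))

def comment_in_line (line : String) : Bool × Int :=
  let cs := line.toList
  let code_line : List Nat := (List.range cs.length).foldl
    (fun acc symb => if cs[symb]! == '\'' || cs[symb]! == '"' then acc ++ [symb] else acc) []
  if code_line.isEmpty && PySem.Str.isIn "#" line then
    (true, PySem.Str.find line "#")
  else
    -- outer 'for i in range(len(line))' loop: returns (True, i) at the first hit, else falls through
    match (List.range cs.length).find? (fun i => cs[i]! == '#' && pvInnerA code_line i) with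
    | some i => (true, (i : Int))
    | none => (false, -1)

-- ===== PORT B =====
-- second 'for i, c in enumerate(line)' loop of B, carrying the running index and quote count
def pvAltLoop (suf : List Char) (i q : Nat) (last : Int) : Bool × Int :=
  match suf with
  | [] => (false, -1)
  | c :: rest =>
    if c == '\'' || c == '"' then pvAltLoop rest (i+1) (q+1) last
    else if c == '#' && (q % 2 == 0 || decide (last < (i : Int))) then (true, (i : Int))
    else pvAltLoop rest (i+1) q last

def comment_in_line_alt (line : String) : Bool × Int :=
  let cs := line.toList
  let last : Int := (PySem.List.enumerate cs 0).foldl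
    (fun lq ci => if ci.2 == '\'' || ci.2 == '"' then ci.1 else lq) (-1)
  pvAltLoop cs 0 0 last

-- ===== PRECONDITION & SPEC =====
-- On lines containing exactly one quote character and at least one hash mark, A's inner loop over
-- quote pairs is empty so A returns (False, -1), while B returns (True, index of the first hash):
-- B's value is the intended one, since that hash lies outside any string literal.
def D_comment_in_line (line : String) : Prop :=
  line.toList.countP (fun c => c == '\'' || c == '"') = 1 ∧ '#' ∈ line.toList
instance (line : String) : Decidable (D_comment_in_line line) := by
  unfold D_comment_in_line; infer_instance

def Spec_comment_in_line (line : String) (out : Bool × Int) : Prop :=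
  ¬ D_comment_in_line line → out = comment_in_line_alt line
instance (line : String) (out : Bool × Int) : Decidable (Spec_comment_in_line line out) := by
  unfold Spec_comment_in_line; infer_instance

def pvDiffWitness_comment_in_line : String := "x = 1  # can't"
def pvDiffWitnessOut_comment_in_line : (Bool × Int) × (Bool × Int) := ((false, -1), (true, 7))

-- ===== CLAIM (what is proved, stated in full; the proofs are below) =====
def Claim_unchanged_comment_in_line : Prop := ∀ (line : String), Dom_comment_in_line line → Spec_comment_in_line line (comment_in_line line)
def Claim_changed_comment_in_line : Prop := Dom_comment_in_line (pvDiffWitness_comment_in_line) ∧ D_comment_in_line (pvDiffWitness_comment_in_line) ∧ comment_in_line (pvDiffWitness_comment_in_line) = pvDiffWitnessOut_comment_in_line.1 ∧ comment_in_line_alt (pvDiffWitness_comment_in_line) = pvDiffWitnessOut_comment_in_line.2 ∧ pvDiffWitnessOut_comment_in_line.1 ≠ pvDiffWitnessOut_comment_in_line.2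
def Claim_exact_comment_in_line : Prop := ∀ (line : String), Dom_comment_in_line line → D_comment_in_line line → comment_in_line line ≠ comment_in_line_alt line

-- ===== LEMMAS AND PROOFS =====

-- the quote test, and the quote-index list Q of a character list
def pvIsQ (c : Char) : Bool := c == '\'' || c == '"'
def pvQ (cs : List Char) : List Nat := (List.range cs.length).filter (fun k => pvIsQ cs[k]!)
-- number of quotes among the first i characters
def pvCnt (cs : List Char) (i : Nat) : Nat := (List.range i).countP (fun k => pvIsQ cs[k]!)
-- the common specification predicate both ports are reduced to
def pvP (cs : List Char) (last : Int) (i : Nat) : Bool :=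
  cs[i]! == '#' && (pvCnt cs i % 2 == 0 || decide (last < (i : Int)))
def pvSpecFind (cs : List Char) (last : Int) : Bool × Int :=
  match (List.range cs.length).find? (pvP cs last) with
  | some i => (true, (i : Int))
  | none => (false, -1)
-- B's last-quote fold
def pvLast (cs : List Char) : Int :=
  (PySem.List.enumerate cs 0).foldl
    (fun lq ci => if ci.2 == '\'' || ci.2 == '"' then ci.1 else lq) (-1)

theorem pv_getElem_bang_append_left (ds t : List Char) (k : Nat) (hk : k < ds.length) :
    (ds ++ t)[k]! = ds[k]! := by
  rw [getElem!_pos (ds ++ t) k (by rw [List.length_append]; omega),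
      getElem!_pos ds k hk, List.getElem_append_left hk]

theorem pvQ_sorted (cs : List Char) : (pvQ cs).Pairwise (· < ·) :=
  List.Pairwise.filter _ (List.pairwise_lt_range)

theorem pvQ_mem (cs : List Char) (k : Nat) : k ∈ pvQ cs ↔ k < cs.length ∧ pvIsQ cs[k]! = true := by
  simp [pvQ, List.mem_filter, List.mem_range]

theorem pv_countP_range (cs : List Char) (q : Char → Bool) :
    (List.range cs.length).countP (fun k => q cs[k]!) = cs.countP q := by
  induction cs using List.reverseRecOn with
  | nil => simp
  | append_singleton ds c ih =>
    rw [List.length_append, List.length_singleton, List.range_succ, List.countP_append,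
        List.countP_append]
    have h1 : (List.range ds.length).countP (fun k => q (ds ++ [c])[k]!)
        = (List.range ds.length).countP (fun k => q ds[k]!) := by
      apply List.countP_congr
      intro k hk
      rw [pv_getElem_bang_append_left ds [c] k (List.mem_range.mp hk)]
    have h2 : (ds ++ [c])[ds.length]! = c := by
      rw [getElem!_pos _ _ (by simp), List.getElem_concat_length]
      rfl
    rw [h1, ih, List.countP_cons, List.countP_nil, List.countP_cons, List.countP_nil, h2]

theorem pvQ_length (cs : List Char) : (pvQ cs).length = cs.countP pvIsQ := by
  rw [pvQ, ← List.countP_eq_length_filter, pv_countP_range]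

theorem pvQ_append_singleton (ds : List Char) (c : Char) :
    pvQ (ds ++ [c]) = pvQ ds ++ (if pvIsQ c then [ds.length] else []) := by
  unfold pvQ
  rw [List.length_append, List.length_singleton, List.range_succ, List.filter_append]
  have h1 : (List.range ds.length).filter (fun k => pvIsQ (ds ++ [c])[k]!)
      = (List.range ds.length).filter (fun k => pvIsQ ds[k]!) := by
    apply List.filter_congr
    intro k hk
    rw [pv_getElem_bang_append_left ds [c] k (List.mem_range.mp hk)]
  have h2 : (ds ++ [c])[ds.length]! = c := by
    rw [getElem!_pos _ _ (by simp), List.getElem_concat_length]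
    rfl
  rw [h1]
  congr 1
  rw [List.filter_singleton, h2]
  cases pvIsQ c <;> rfl

theorem pvLast_eq (cs : List Char) :
    pvLast cs = if pvQ cs = [] then -1 else ((pvQ cs)[(pvQ cs).length - 1]! : Int) := by
  induction cs using List.reverseRecOn with
  | nil => simp [pvLast, pvQ, PySem.List.enumerate]
  | append_singleton ds c ih =>
    have hL : pvLast (ds ++ [c])
        = if pvIsQ c then (ds.length : Int) else pvLast ds := by
      unfold pvLast
      rw [PySem.List.enumerate_append, List.foldl_append]
      simp [PySem.List.enumerate, pvIsQ]
    rw [hL, pvQ_append_singleton]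
    by_cases hc : pvIsQ c
    · have hne : pvQ ds ++ [ds.length] ≠ [] := by simp
      rw [if_pos hc, if_pos hc, if_neg hne]
      have he : (pvQ ds ++ [ds.length]).length - 1 = (pvQ ds).length := by simp
      rw [he, getElem!_pos _ _ (by simp), List.getElem_concat_length]
      rfl
    · rw [if_neg hc, if_neg hc, List.append_nil, ih]

theorem pvCnt_eq_countP (cs : List Char) (i : Nat) (hi : i ≤ cs.length) :
    (pvQ cs).countP (fun x => decide (x < i)) = pvCnt cs i := by
  unfold pvQ pvCnt
  rw [List.countP_filter]
  have hsplit : cs.length = i + (cs.length - i) := by omega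
  rw [hsplit, List.range_add, List.countP_append]
  have h1 : (List.range i).countP (fun a => decide (a < i) && pvIsQ cs[a]!)
      = (List.range i).countP (fun k => pvIsQ cs[k]!) := by
    apply List.countP_congr
    intro k hk
    have := List.mem_range.mp hk
    simp [this]
  have h2 : ((List.range (cs.length - i)).map (fun x => i + x)).countP
      (fun a => decide (a < i) && pvIsQ cs[a]!) = 0 := by
    rw [List.countP_eq_zero]
    intro a ha
    obtain ⟨x, _, rfl⟩ := List.mem_map.mp ha
    simp
  rw [h1, h2]
  omega

theorem pv_sorted_lt_iff (Q : List Nat) (hs : Q.Pairwise (· < ·)) (k : Nat) (hk : k < Q.length)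
    (i : Nat) : Q[k] < i ↔ k < Q.countP (fun x => decide (x < i)) := by
  induction Q generalizing k with
  | nil => simp at hk
  | cons x t ih =>
    rw [List.pairwise_cons] at hs
    obtain ⟨hx, ht⟩ := hs
    rw [List.countP_cons]
    cases k with
    | zero =>
      simp only [List.getElem_cons_zero]
      by_cases hxi : x < i
      · simp [hxi]
      · have h0 : t.countP (fun x => decide (x < i)) = 0 := by
          rw [List.countP_eq_zero]
          intro y hy
          have := hx y hy
          simp only [decide_eq_true_eq]
          omega
        simp [hxi, h0]
    | succ k =>
      simp only [List.getElem_cons_succ]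
      have hk' : k < t.length := by simpa using hk
      by_cases hxi : x < i
      · rw [ih ht k hk']
        simp only [hxi, decide_true, if_pos]
        omega
      · have h0 : t.countP (fun x => decide (x < i)) = 0 := by
          rw [List.countP_eq_zero]
          intro y hy
          have := hx y hy
          simp only [decide_eq_true_eq]
          omega
        have hlt : ¬ t[k] < i := by
          have := hx t[k] (List.getElem_mem hk')
          omega
        simp [hxi, h0, hlt]

theorem pv_find?_range'_first (p : Nat → Bool) (m : Nat) :
    ∀ (len s : Nat), s ≤ m → m < s + len → p m = true →
    (∀ k, s ≤ k → k < m → p k = false) → (List.range' s len).find? p = some m := by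
  intro len
  induction len with
  | zero => intro s h1 h2 _ _; omega
  | succ len ih =>
    intro s h1 h2 hp hmin
    rw [List.range'_succ]
    by_cases hsm : s = m
    · subst hsm
      rw [List.find?_cons_of_pos hp]
    · rw [List.find?_cons_of_neg (by rw [hmin s le_rfl (by omega)]; simp)]
      exact ih (s + 1) (by omega) (by omega) hp (fun k hk1 hk2 => hmin k (by omega) hk2)

theorem pv_find?_congr {α : Type} (l : List α) (p q : α → Bool)
    (h : ∀ a ∈ l, p a = q a) : l.find? p = l.find? q := by
  induction l with
  | nil => rfl
  | cons x t ih =>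
    rw [List.find?_cons, List.find?_cons, h x List.mem_cons_self,
        ih (fun a ha => h a (List.mem_cons_of_mem x ha))]

-- characterisation of A's inner loop when there are at least two quotes
theorem pvInnerA_eq (cs : List Char) (i : Nat) (hq : pvIsQ cs[i]! = false)
    (h2 : 2 ≤ (pvQ cs).length) (hi : i < cs.length) :
    pvInnerA (pvQ cs) i
      = ((pvCnt cs i % 2 == 0) || decide ((pvQ cs)[(pvQ cs).length - 1]! < i)) := by
  set Q := pvQ cs with hQdef
  have hs := pvQ_sorted cs
  rw [← hQdef] at hs
  have hmono : ∀ a b (hab : a ≤ b) (hb : b < Q.length),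
      Q[a]'(Nat.lt_of_le_of_lt hab hb) ≤ Q[b] := by
    intro a b hab hb
    rcases Nat.lt_or_ge a b with h | h
    · exact le_of_lt ((List.pairwise_iff_getElem.mp hs) a b (by omega) hb h)
    · have hab2 : a = b := by omega
      subst hab2; rfl
  have hnotmem : ∀ k, ∀ (hk : k < Q.length), Q[k] ≠ i := by
    intro k hk he
    have hmm : Q[k]'hk ∈ Q := List.getElem_mem hk
    rw [he] at hmm
    rw [hQdef, pvQ_mem] at hmm
    rw [hmm.2] at hq
    exact absurd hq (by simp)
  have hbang : ∀ k (hk : k < Q.length), Q[k]! = Q[k]'hk := fun k hk => getElem!_pos Q k hk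
  rw [← pvCnt_eq_countP cs i (le_of_lt hi), ← hQdef]
  set c := Q.countP (fun x => decide (x < i)) with hcdef
  have hlt_iff : ∀ k, ∀ (hk : k < Q.length), (Q[k] < i ↔ k < c) :=
    fun k hk => pv_sorted_lt_iff Q hs k hk i
  unfold pvInnerA
  by_cases h0 : i < Q[0]'(by omega)
  · -- i before all quotes: c = 0, j = 0 fires via the elif branch
    have hc0 : c = 0 := by
      by_contra hne
      have := (hlt_iff 0 (by omega)).mpr (by omega)
      omega
    rw [List.any_eq_true.mpr ⟨0, List.mem_range.mpr (by omega), by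
      rw [if_neg (by
        simp only [Bool.and_eq_true, decide_eq_true_eq, not_and]
        intro hl
        rw [hbang 0 (by omega)] at hl
        omega)]
      simp only [Bool.or_eq_true, decide_eq_true_eq]
      left; rw [hbang 0 (by omega)]; omega⟩]
    rw [hc0]
    simp
  · by_cases hL : Q[Q.length - 1]'(by omega) < i
    · -- i after all quotes: j = 0 fires via the elif branch
      have h1i : ¬ (i < Q[1]'(by omega)) := by
        have := hmono 1 (Q.length - 1) (by omega) (by omega)
        omega
      rw [List.any_eq_true.mpr ⟨0, List.mem_range.mpr (by omega), by
        rw [if_neg (by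
          simp only [Bool.and_eq_true, decide_eq_true_eq, not_and]
          intro _
          rw [hbang 1 (by omega)]
          omega)]
        simp only [Bool.or_eq_true, decide_eq_true_eq]
        right; rw [hbang (Q.length - 1) (by omega)]; omega⟩]
      rw [Bool.true_eq]
      simp only [Bool.or_eq_true, decide_eq_true_eq]
      right; rw [hbang (Q.length - 1) (by omega)]; omega
    · -- i strictly between two quotes
      have h0' : Q[0]'(by omega) < i := by
        have := hnotmem 0 (by omega); omega
      have hLi : i < Q[Q.length - 1]'(by omega) := by
        have := hnotmem (Q.length - 1) (by omega); omega
      have hc1 : 1 ≤ c := by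
        have := (hlt_iff 0 (by omega)).mp h0'; omega
      have hcle : c ≤ Q.length - 1 := by
        by_contra hgt
        have := (hlt_iff (Q.length - 1) (by omega)).mpr (by omega)
        omega
      have hjlt : Q[c-1]'(by omega) < i := (hlt_iff (c-1) (by omega)).mpr (by omega)
      have hjgt : i < Q[c]'(by omega) := by
        have hnl : ¬ (Q[c]'(by omega) < i) := by
          intro hcc
          have := (hlt_iff c (by omega)).mp hcc; omega
        have := hnotmem c (by omega)
        omega
      have hrhs : decide (Q[Q.length - 1]! < i) = false := by
        rw [hbang (Q.length - 1) (by omega)]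
        simp only [decide_eq_false_iff_not]
        omega
      by_cases hpar : c % 2 = 0
      · -- an odd-indexed gap: witness j = c - 1
        have hodd : (c - 1) % 2 = 1 := by omega
        rw [List.any_eq_true.mpr ⟨c - 1, List.mem_range.mpr (by omega), by
          rw [if_pos (by
            simp only [Bool.and_eq_true, decide_eq_true_eq]
            rw [hbang (c-1) (by omega), hbang (c-1+1) (by omega)]
            have he : c - 1 + 1 = c := by omega
            constructor
            · exact hjlt
            · simp only [he]
              exact hjgt)]
          simp [hodd]⟩]
        rw [hrhs]
        simp [hpar]
      · -- an even-indexed gap: no branch can fire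
        have hall : (List.range (Q.length - 1)).any (fun j =>
            if Q[j]! < i && i < Q[j+1]! then decide (j % 2 = 1)
            else decide (i < Q[0]!) || decide (Q[Q.length - 1]! < i)) = false := by
          rw [List.any_eq_false]
          intro j hj
          have hjr := List.mem_range.mp hj
          by_cases hcond : (Q[j]! < i && i < Q[j+1]! : Bool) = true
          · rw [if_pos hcond]
            simp only [Bool.and_eq_true, decide_eq_true_eq] at hcond
            rw [hbang j (by omega), hbang (j+1) (by omega)] at hcond
            have hjc : j = c - 1 := by
              by_contra hne2
              rcases Nat.lt_or_ge j (c-1) with hlt2 | hge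
              · have := hmono (j+1) (c-1) (by omega) (by omega)
                omega
              · have := hmono c j (by omega) (by omega)
                omega
            simp only [decide_eq_true_eq]
            omega
          · rw [if_neg hcond]
            simp only [Bool.or_eq_true, decide_eq_true_eq, not_or]
            constructor
            · rw [hbang 0 (by omega)]; omega
            · rw [hbang (Q.length - 1) (by omega)]; omega
        rw [hall, hrhs]
        have hbe : (c % 2 == 0) = false := beq_eq_false_iff_ne.mpr hpar
        rw [hbe]
        rfl

theorem pvAltLoop_general (cs : List Char) (last : Int) :
    ∀ (d i : Nat), i + d = cs.length →
    pvAltLoop (cs.drop i) i (pvCnt cs i) last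
      = (match (List.range' i d).find? (pvP cs last) with
         | some m => (true, (m : Int)) | none => (false, -1)) := by
  intro d
  induction d with
  | zero =>
    intro i h
    have he : i = cs.length := by omega
    subst he
    simp [pvAltLoop]
  | succ d ih =>
    intro i h
    have hi : i < cs.length := by omega
    have hbang : cs[i]! = cs[i] := getElem!_pos cs i hi
    rw [List.drop_eq_getElem_cons hi, List.range'_succ, List.find?_cons]
    have hcnt_succ : ∀ b : Bool, pvIsQ cs[i] = b →
        pvCnt cs (i+1) = pvCnt cs i + (if b then 1 else 0) := by
      intro b hb
      unfold pvCnt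
      rw [List.range_succ, List.countP_append, List.countP_cons, List.countP_nil, hbang, hb]
      cases b <;> simp
    by_cases hq : (cs[i] == '\'' || cs[i] == '"') = true
    · have hP : pvP cs last i = false := by
        unfold pvP
        have hnh : (cs[i]! == '#') = false := by
          rw [hbang]
          rcases Bool.or_eq_true_iff.mp hq with h' | h' <;>
            (rw [beq_iff_eq] at h'; rw [h']; decide)
        rw [hnh, Bool.false_and]
      rw [hP]
      show pvAltLoop (cs[i] :: cs.drop (i+1)) i (pvCnt cs i) last = _
      rw [pvAltLoop, if_pos hq]
      have he : pvCnt cs i + 1 = pvCnt cs (i+1) := by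
        rw [hcnt_succ true (by simpa [pvIsQ] using hq)]
        simp
      rw [he]
      exact ih (i+1) (by omega)
    · by_cases hsh : (cs[i] == '#' && (pvCnt cs i % 2 == 0 || decide (last < (i : Int)))) = true
      · have hP : pvP cs last i = true := by unfold pvP; rw [hbang]; exact hsh
        rw [hP]
        show pvAltLoop (cs[i] :: cs.drop (i+1)) i (pvCnt cs i) last = _
        rw [pvAltLoop, if_neg (by simp_all), if_pos hsh]
      · have hP : pvP cs last i = false := by
          unfold pvP
          rw [hbang]
          exact Bool.eq_false_iff.mpr (fun hc => hsh hc)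
        rw [hP]
        show pvAltLoop (cs[i] :: cs.drop (i+1)) i (pvCnt cs i) last = _
        rw [pvAltLoop, if_neg (by simp_all), if_neg (by simp_all)]
        have he : pvCnt cs i = pvCnt cs (i+1) := by
          rw [hcnt_succ false (by simpa [pvIsQ] using hq)]
          simp
        rw [he]
        exact ih (i+1) (by omega)

theorem pvB_eq (line : String) :
    comment_in_line_alt line = pvSpecFind line.toList (pvLast line.toList) := by
  show pvAltLoop line.toList 0 0 (pvLast line.toList) = _
  have h0 : pvCnt line.toList 0 = 0 := by simp [pvCnt]
  have hg := pvAltLoop_general line.toList (pvLast line.toList) line.toList.length 0 (by omega)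
  rw [List.drop_zero, h0] at hg
  rw [hg, pvSpecFind, List.range_eq_range']

-- A's quote-collecting loop builds exactly pvQ
theorem pvA_code (cs : List Char) :
    (List.range cs.length).foldl
      (fun acc symb => if cs[symb]! == '\'' || cs[symb]! == '"' then acc ++ [symb] else acc) []
      = pvQ cs := by
  rw [PySem.List.foldl_append_if_eq_filter, List.nil_append]
  rfl

theorem pv_singleton_prefix_drop (cs : List Char) (j : Nat) :
    ['#'] <+: cs.drop j ↔ j < cs.length ∧ cs[j]? = some '#' := by
  constructor
  · rintro ⟨t, ht⟩
    have hj : j < cs.length := by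
      by_contra hge
      rw [List.drop_eq_nil_of_le (by omega)] at ht
      simp at ht
    rw [List.drop_eq_getElem_cons hj] at ht
    rw [List.getElem?_eq_getElem hj]
    refine ⟨hj, ?_⟩
    simp only [List.cons_append, List.nil_append] at ht
    rw [List.cons.injEq] at ht
    rw [ht.1]
  · rintro ⟨hj, hc⟩
    refine ⟨cs.drop (j+1), ?_⟩
    rw [List.drop_eq_getElem_cons hj]
    rw [List.getElem?_eq_getElem hj] at hc
    simp only [Option.some.injEq] at hc
    rw [hc]
    rfl

theorem pvA_eq (line : String) (hD : ¬ D_comment_in_line line) :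
    comment_in_line line = pvSpecFind line.toList (pvLast line.toList) := by
  show (if ((List.range line.toList.length).foldl
        (fun acc symb => if line.toList[symb]! == '\'' || line.toList[symb]! == '"'
          then acc ++ [symb] else acc) []).isEmpty && PySem.Str.isIn "#" line then
      (true, PySem.Str.find line "#")
    else
      match (List.range line.toList.length).find? (fun i => line.toList[i]! == '#' &&
        pvInnerA ((List.range line.toList.length).foldl
          (fun acc symb => if line.toList[symb]! == '\'' || line.toList[symb]! == '"'
            then acc ++ [symb] else acc) []) i) with
      | some i => (true, (i : Int))
      | none => (false, -1)) = _
  rw [pvA_code]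
  set cs := line.toList with hcs
  by_cases hQnil : pvQ cs = []
  · have hnoq : ∀ k, k < cs.length → pvIsQ cs[k]! = false := by
      intro k hk
      by_contra hne
      have hm : k ∈ pvQ cs := (pvQ_mem cs k).mpr ⟨hk, by revert hne; cases (pvIsQ cs[k]!) <;> simp⟩
      rw [hQnil] at hm
      simp at hm
    have hcntz : ∀ i, i ≤ cs.length → pvCnt cs i = 0 := by
      intro i hile
      unfold pvCnt
      rw [List.countP_eq_zero]
      intro k hk
      rw [hnoq k (by have := List.mem_range.mp hk; omega)]
      simp
    by_cases hin : PySem.Str.isIn "#" line = true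
    · rw [if_pos (by rw [hQnil, hin]; rfl)]
      have hinf : ('#' :: []) <:+: cs := by
        have := (PySem.Str.isIn_iff_infix "#" line).mp hin
        simpa using this
      have hfnn : (0 : Int) ≤ PySem.Chars.find cs ['#'] :=
        (PySem.Chars.find_nonneg_iff cs ['#']).mpr hinf
      obtain ⟨hpre, hmin⟩ := PySem.Chars.find_spec hfnn
      set f := PySem.Chars.find cs ['#'] with hf
      obtain ⟨hflt, hfc⟩ := (pv_singleton_prefix_drop cs f.toNat).mp hpre
      have hP : pvP cs (pvLast cs) f.toNat = true := by
        unfold pvP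
        rw [getElem!_pos cs f.toNat hflt]
        rw [List.getElem?_eq_getElem hflt] at hfc
        simp only [Option.some.injEq] at hfc
        rw [hfc, hcntz f.toNat (by omega)]
        simp
      have hPmin : ∀ k, 0 ≤ k → k < f.toNat → pvP cs (pvLast cs) k = false := by
        intro k _ hk
        have hkn : k < cs.length := by omega
        have hnp : ¬ ['#'] <+: cs.drop k := hmin k hk
        rw [pv_singleton_prefix_drop] at hnp
        push Not at hnp
        have hne := hnp hkn
        unfold pvP
        rw [getElem!_pos cs k hkn]
        rw [List.getElem?_eq_getElem hkn] at hne
        have hne2 : cs[k] ≠ '#' := fun h => hne (by rw [h])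
        rw [beq_eq_false_iff_ne.mpr hne2, Bool.false_and]
      have hfind : (List.range cs.length).find? (pvP cs (pvLast cs)) = some f.toNat := by
        rw [List.range_eq_range']
        exact pv_find?_range'_first _ f.toNat cs.length 0 (by omega) (by omega) hP hPmin
      rw [pvSpecFind, hfind]
      show (true, PySem.Str.find line "#") = (true, ((f.toNat : Nat) : Int))
      have hfn : ((f.toNat : Nat) : Int) = f := Int.toNat_of_nonneg hfnn
      rw [hfn]
      have hfeq : PySem.Str.find line "#" = f := by
        simp only [PySem.Str.find_eq]
        rw [show ("#".toList) = ['#'] from rfl, hf, hcs]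
      rw [hfeq]
    · have hinf : PySem.Str.isIn "#" line = false := by
        revert hin; cases PySem.Str.isIn "#" line <;> simp
      rw [if_neg (by rw [hinf, Bool.and_false]; simp)]
      have hnos : ∀ k, k < cs.length → (cs[k]! == '#') = false := by
        intro k hk
        rw [getElem!_pos cs k hk]
        by_contra hne
        have hc : cs[k] = '#' := by
          revert hne
          cases hbe : (cs[k] == '#')
          · intro h; exact absurd rfl h
          · intro _; exact beq_iff_eq.mp hbe
        apply hin
        rw [PySem.Str.isIn_iff_infix]
        show "#".toList <:+: cs
        have hpre : ['#'] <+: cs.drop k :=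
          (pv_singleton_prefix_drop cs k).mpr ⟨hk, by rw [List.getElem?_eq_getElem hk, hc]⟩
        obtain ⟨t, ht⟩ := hpre
        exact ⟨cs.take k, t, by
          show cs.take k ++ "#".toList ++ t = cs
          rw [show ("#".toList) = ['#'] from rfl, List.append_assoc, ht,
            List.take_append_drop]⟩
      have hfa : (List.range cs.length).find? (fun i => cs[i]! == '#' && pvInnerA (pvQ cs) i)
          = none := by
        rw [List.find?_eq_none]
        intro k hk
        rw [hnos k (List.mem_range.mp hk), Bool.false_and]
        simp
      have hfb : (List.range cs.length).find? (pvP cs (pvLast cs)) = none := by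
        rw [List.find?_eq_none]
        intro k hk
        unfold pvP
        rw [hnos k (List.mem_range.mp hk), Bool.false_and]
        simp
      rw [hfa, pvSpecFind, hfb]
  · -- at least one quote
    have hie : (pvQ cs).isEmpty = false := by
      rw [List.isEmpty_eq_false_iff]
      exact hQnil
    rw [if_neg (by rw [hie, Bool.false_and]; simp)]
    have hpred : ∀ i ∈ List.range cs.length,
        (cs[i]! == '#' && pvInnerA (pvQ cs) i) = pvP cs (pvLast cs) i := by
      intro i hi
      have hin2 : i < cs.length := List.mem_range.mp hi
      by_cases hsh : (cs[i]! == '#') = true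
      · have hceq : cs[i]! = '#' := beq_iff_eq.mp hsh
        have hq : pvIsQ cs[i]! = false := by rw [hceq]; decide
        have hmemh : '#' ∈ cs := by
          rw [← hceq, getElem!_pos cs i hin2]
          exact List.getElem_mem hin2
        have hlen1 : (pvQ cs).length ≠ 1 := by
          intro hl
          apply hD
          constructor
          · show cs.countP (fun c => c == '\'' || c == '"') = 1
            rw [show (fun c : Char => c == '\'' || c == '"') = pvIsQ from rfl, ← pvQ_length]
            exact hl
          · exact hmemh
        have h2 : 2 ≤ (pvQ cs).length := by
          have hpos : 0 < (pvQ cs).length := List.length_pos_iff.mpr hQnil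
          omega
        rw [pvInnerA_eq cs i hq h2 hin2]
        unfold pvP
        rw [hsh, Bool.true_and, Bool.true_and]
        congr 1
        rw [pvLast_eq, if_neg hQnil]
        rw [getElem!_pos _ _ (by have := List.length_pos_iff.mpr hQnil; omega)]
        simp
      · have hshf : (cs[i]! == '#') = false := by
          revert hsh; cases (cs[i]! == '#') <;> simp
        rw [hshf, Bool.false_and]
        unfold pvP
        rw [hshf, Bool.false_and]
    rw [pv_find?_congr _ _ _ hpred, pvSpecFind]

-- ===== VERDICT (by name: the statement is the Claim_ definition above) =====
theorem comment_in_line_spec : Claim_unchanged_comment_in_line := by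
  intro line _ hD
  rw [pvA_eq line hD, pvB_eq line]

theorem comment_in_line_changed : Claim_changed_comment_in_line := by
  unfold Claim_changed_comment_in_line; decide

theorem comment_in_line_tight : Claim_exact_comment_in_line := by
  intro line _ hDd
  obtain ⟨hc1, hmem⟩ := hDd
  set cs := line.toList with hcs
  have hQ1 : (pvQ cs).length = 1 := by
    rw [pvQ_length]
    exact hc1
  have hQnil : pvQ cs ≠ [] := by
    intro h; rw [h] at hQ1; simp at hQ1
  have hA : comment_in_line line = (false, -1) := by
    show (if ((List.range cs.length).foldl
          (fun acc symb => if cs[symb]! == '\'' || cs[symb]! == '"'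
            then acc ++ [symb] else acc) []).isEmpty && PySem.Str.isIn "#" line then
        (true, PySem.Str.find line "#")
      else
        match (List.range cs.length).find? (fun i => cs[i]! == '#' &&
          pvInnerA ((List.range cs.length).foldl
            (fun acc symb => if cs[symb]! == '\'' || cs[symb]! == '"'
              then acc ++ [symb] else acc) []) i) with
        | some i => (true, (i : Int))
        | none => (false, -1)) = (false, -1)
    rw [pvA_code]
    have hie : (pvQ cs).isEmpty = false := by
      rw [List.isEmpty_eq_false_iff]
      exact hQnil
    rw [if_neg (by rw [hie, Bool.false_and]; simp)]
    have hinner : ∀ i, pvInnerA (pvQ cs) i = false := by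
      intro i
      unfold pvInnerA
      rw [hQ1]
      simp
    have hfn : (List.range cs.length).find? (fun i => cs[i]! == '#' && pvInnerA (pvQ cs) i)
        = none := by
      rw [List.find?_eq_none]
      intro k _
      rw [hinner k, Bool.and_false]
      simp
    rw [hfn]
  obtain ⟨j, hj, hjc⟩ := List.mem_iff_getElem.mp hmem
  have hP : pvP cs (pvLast cs) j = true := by
    unfold pvP
    rw [getElem!_pos cs j hj, hjc]
    rcases Nat.eq_zero_or_pos (pvCnt cs j) with hz | hpos
    · rw [hz]; simp
    · have hpos' : 0 < (List.range j).countP (fun k => pvIsQ cs[k]!) := hpos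
      obtain ⟨k, hkmem, hkp⟩ := List.countP_pos_iff.mp hpos'
      have hkj : k < j := List.mem_range.mp hkmem
      have hkQ : k ∈ pvQ cs := (pvQ_mem cs k).mpr ⟨by omega, hkp⟩
      obtain ⟨q0, hq0⟩ := List.length_eq_one_iff.mp hQ1
      rw [hq0] at hkQ
      have hkq0 : k = q0 := by simpa using hkQ
      have hlast : pvLast cs = (q0 : Int) := by
        rw [pvLast_eq, if_neg hQnil, hq0]
        simp
      rw [hlast]
      have hql : ((q0 : Int) < (j : Int)) := by
        have : q0 < j := by omega
        exact_mod_cast this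
      simp [hql]
  have hB : (comment_in_line_alt line).1 = true := by
    rw [pvB_eq line]
    unfold pvSpecFind
    cases hfind : (List.range cs.length).find? (pvP cs (pvLast cs)) with
    | none =>
      exfalso
      exact absurd hP (by simpa using List.find?_eq_none.mp hfind j (List.mem_range.mpr hj))
    | some m => rfl
  rw [hA]
  intro hcontra
  rw [← hcontra] at hB
  simp at hB
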